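-- pv_equiv track=rewrite | github.com/rawbby/tinape | core/util/gen_macro.py | generate_pop
-- ===== SOURCE A (Python) =====
-- def generate_pop(n):
--     lines = []
--     lines.append('#define POP_0()')
--     lines.append('#define POP_1(_0)')
--     for i in range(2, n + 1):
--         params = ','.join(f"_{j}" for j in range(0, i))
--         expansion = ','.join(f"_{j}" for j in range(0, i - 1))
--         lines.append(f"#define POP_{i}({params}){expansion}")
--     return '\n'.join(lines)
-- ===== SOURCE B (Python) =====
-- def generate_pop(n):
--     lines = ['#define POP_0()', '#define POP_1(_0)']
--     expansion = '_0'
--     for i in range(2, n + 1):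
--         params = expansion + f",_{i - 1}"
--         lines.append(f"#define POP_{i}({params}){expansion}")
--         expansion = params
--     return '\n'.join(lines)
-- ===== Notes on version B (the rewrite author's own statement) =====
-- stated objective: faster
-- what changed: B keeps a running 'expansion' accumulator and extends it by one parameter per iteration instead of rebuilding both comma-joined parameter lists from scratch with two range-comprehensions in every iteration.
import Mathlib
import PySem

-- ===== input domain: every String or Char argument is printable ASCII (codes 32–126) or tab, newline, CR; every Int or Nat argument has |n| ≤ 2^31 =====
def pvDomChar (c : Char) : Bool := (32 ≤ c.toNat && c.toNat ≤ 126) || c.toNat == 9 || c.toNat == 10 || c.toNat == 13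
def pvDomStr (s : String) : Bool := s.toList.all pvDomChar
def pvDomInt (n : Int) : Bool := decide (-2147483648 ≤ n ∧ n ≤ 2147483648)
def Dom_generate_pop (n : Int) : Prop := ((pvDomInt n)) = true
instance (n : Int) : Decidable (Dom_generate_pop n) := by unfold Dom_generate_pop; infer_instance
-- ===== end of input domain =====

-- B replaces A's per-iteration rebuild of the two comma-joined range comprehensions by a
-- running 'expansion' accumulator extended by one parameter per iteration (objective: faster,
-- constant-factor; return value identical).

-- ===== PORT A =====
-- loop body of A: params and expansion each rebuilt from a range comprehension, line appended
def genA_step (acc : List (List Char)) (i : Int) : List (List Char) :=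
  let params := PySem.Chars.join [','] ((PySem.List.pyRange 0 i 1).map (fun j => '_' :: PySem.Int.toChars j))
  let expansion := PySem.Chars.join [','] ((PySem.List.pyRange 0 (i - 1) 1).map (fun j => '_' :: PySem.Int.toChars j))
  acc ++ ["#define POP_".toList ++ PySem.Int.toChars i ++ '(' :: (params ++ ')' :: expansion)]

def generate_pop (n : Int) : String :=
  let lines : List (List Char) := ["#define POP_0()".toList, "#define POP_1(_0)".toList]
  let lines := (PySem.List.pyRange 2 (n + 1) 1).foldl genA_step lines
  String.ofList (PySem.Chars.join ['\n'] lines)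

-- ===== PORT B =====
-- loop body of B: state = (lines so far, running expansion); one comma-append per iteration
def genB_step (st : List (List Char) × List Char) (i : Int) : List (List Char) × List Char :=
  let params := st.2 ++ ',' :: '_' :: PySem.Int.toChars (i - 1)
  (st.1 ++ ["#define POP_".toList ++ PySem.Int.toChars i ++ '(' :: (params ++ ')' :: st.2)], params)

def generate_pop_alt (n : Int) : String :=
  let st := (PySem.List.pyRange 2 (n + 1) 1).foldl genB_step
    (["#define POP_0()".toList, "#define POP_1(_0)".toList], "_0".toList)
  String.ofList (PySem.Chars.join ['\n'] st.1)

-- ===== PRECONDITION & SPEC =====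
def Spec_generate_pop (n : Int) (out : String) : Prop := out = generate_pop_alt n
instance (n : Int) (out : String) : Decidable (Spec_generate_pop n out) := by unfold Spec_generate_pop; infer_instance

-- ===== CLAIM (what is proved, stated in full; the proofs are below) =====
def Claim_equal_generate_pop : Prop := ∀ (n : Int), Dom_generate_pop n → Spec_generate_pop n (generate_pop n)

-- ===== LEMMAS AND PROOFS =====

-- the comma-joined parameter list _0,…,_{i-1}, as A computes it
def pvE (i : Int) : List Char :=
  PySem.Chars.join [','] ((PySem.List.pyRange 0 i 1).map (fun j => '_' :: PySem.Int.toChars j))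

theorem pv_join_append_singleton (sep x : List Char) (l : List (List Char)) (h : l ≠ []) :
    PySem.Chars.join sep (l ++ [x]) = PySem.Chars.join sep l ++ sep ++ x := by
  induction l with
  | nil => simp at h
  | cons a t ih =>
    cases t with
    | nil => simp [PySem.Chars.join_cons_cons, PySem.Chars.join_singleton]
    | cons b r =>
      simp only [List.cons_append, PySem.Chars.join_cons_cons] at *
      rw [ih (by simp)]
      simp

theorem pvE_succ (i : Int) (h : 1 ≤ i) :
    pvE (i + 1) = pvE i ++ ',' :: '_' :: PySem.Int.toChars i := by
  unfold pvE
  rw [PySem.List.pyRange_one_succ_right (by omega : (0:Int) ≤ i), List.map_append,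
    List.map_singleton, pv_join_append_singleton]
  · simp
  · have : ((PySem.List.pyRange 0 i 1).map (fun j => '_' :: PySem.Int.toChars j)).length = i.toNat := by
      simp [PySem.List.length_pyRange_one]
    intro hc
    rw [hc] at this
    simp at this
    omega

theorem pv_inv (L0 : List (List Char)) (m : Nat) :
    (PySem.List.pyRange 2 (2 + (m : Int)) 1).foldl genB_step (L0, "_0".toList)
      = ((PySem.List.pyRange 2 (2 + (m : Int)) 1).foldl genA_step L0, pvE (1 + m)) := by
  induction m with
  | zero =>
    rw [show (2 + ((0:Nat) : Int)) = 2 by norm_num, PySem.List.pyRange_one_eq_nil le_rfl]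
    simp only [List.foldl_nil]
    rw [Prod.mk.injEq]
    exact ⟨rfl, by decide⟩
  | succ k ih =>
    have hb : (2 + ((k + 1 : Nat) : Int)) = (2 + (k : Int)) + 1 := by push_cast; ring
    rw [hb, PySem.List.pyRange_one_succ_right (by omega), List.foldl_append, List.foldl_append,
      ih]
    simp only [List.foldl_cons, List.foldl_nil]
    have h1 : (2 + (k : Int)) - 1 = 1 + (k : Int) := by ring
    have h2 : pvE (1 + ((k+1:Nat) : Int)) = pvE (1 + (k:Int)) ++ ',' :: '_' :: PySem.Int.toChars (1 + (k:Int)) := by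
      rw [show (1 + ((k+1:Nat) : Int)) = (1 + (k:Int)) + 1 by push_cast; ring]
      exact pvE_succ _ (by omega)
    simp only [genA_step, genB_step, h1, h2]
    rw [Prod.mk.injEq]
    refine ⟨?_, rfl⟩
    have e1 : ∀ i : Int, PySem.Chars.join [','] ((PySem.List.pyRange 0 i 1).map (fun j => '_' :: PySem.Int.toChars j)) = pvE i := fun _ => rfl
    rw [e1, e1, show (2 + (k:Int)) = (1 + (k:Int)) + 1 by ring, pvE_succ _ (by omega)]

-- ===== VERDICT (by name: the statement is the Claim_ definition above) =====
theorem generate_pop_spec : Claim_equal_generate_pop := by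
  intro n _
  unfold Spec_generate_pop generate_pop generate_pop_alt
  by_cases h : n + 1 ≤ 2
  · rw [PySem.List.pyRange_one_eq_nil h]; rfl
  · have h2 : (2 : Int) ≤ n - 1 + 2 := by omega
    have hm : n + 1 = 2 + ((n - 1).toNat : Int) := by omega
    rw [hm, pv_inv]
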